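-- pv_equiv track=rewrite | github.com/IAmAlexPuga/CPTS355 | HW3.py | sprintLog
-- ===== SOURCE A (Python) =====
-- def sprintLog(sprnt):
--     #newDic = {{task : worker} for worker in sprnt for task in worker }
--     newDic = { }
--     workers = list(sprnt.keys())
--     tasks = list(sprnt.values())
--     List = set()
--
--     #grabs all the tasks and inserts to set List
--     for task in tasks:
--         titles = task.keys()
--         for title in titles:
--             if title not in List:
--                 List.add(title)
--
--     #sorts the Lists contents (tasks)
--     List = set(sorted(List))
--
--
--     #create a temp to store all the workers for a given task
--     for task in List:
--         temp = {}
--         i = 0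
--         for value in sprnt.values():
--             tempValues = value.keys()
--             if task in tempValues:
--                 temp[workers[i]] = value[task]
--             i+=1
--         newDic[task] = temp
--
--     return dict(sorted(newDic.items()))
-- ===== SOURCE B (Python) =====
-- def sprintLog(sprnt):
--     # One pass over all (worker, task) entries, grouping with setdefault,
--     # then emit the tasks in sorted order.
--     inverted = {}
--     for worker, tasks in sprnt.items():
--         for title, val in tasks.items():
--             inverted.setdefault(title, {})[worker] = val
--     return {title: inverted[title] for title in sorted(inverted)}
-- ===== Notes on version B (the rewrite author's own statement) =====
-- stated objective: faster
-- what changed: Replaces A's per-task rescan of every worker (collect all task titles into a set, then for each title scan all workers again with a manual index) by a single pass over all (worker, task) entries that groups workers per task with setdefault, followed by one sort of the task titles; Pre_ only excludes association lists with duplicate task keys inside a worker's dict, which do not represent any Python dict input.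
import Mathlib
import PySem

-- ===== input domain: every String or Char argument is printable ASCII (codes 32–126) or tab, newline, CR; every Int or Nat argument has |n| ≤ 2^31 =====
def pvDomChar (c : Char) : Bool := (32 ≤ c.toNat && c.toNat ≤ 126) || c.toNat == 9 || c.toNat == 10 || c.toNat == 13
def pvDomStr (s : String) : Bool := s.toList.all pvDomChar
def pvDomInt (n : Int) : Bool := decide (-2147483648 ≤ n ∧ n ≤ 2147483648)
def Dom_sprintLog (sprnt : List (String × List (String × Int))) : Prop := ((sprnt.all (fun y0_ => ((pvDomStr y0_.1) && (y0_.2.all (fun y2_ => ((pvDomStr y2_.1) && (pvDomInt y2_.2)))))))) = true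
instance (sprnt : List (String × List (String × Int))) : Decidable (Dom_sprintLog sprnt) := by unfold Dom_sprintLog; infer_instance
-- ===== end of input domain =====

-- B replaces A's per-task rescan of all workers by one grouping pass over all (worker, task)
-- entries plus a single sort of the task titles (asymptotically fewer dict scans).

-- ===== PORT A =====
-- Literal port of A. Notes on exactness:
--  * Python iterates the set `List` with unspecified hash order; the result cannot depend on
--    that order (each `temp` is computed independently of it and `newDic` is sorted by its
--    distinct keys at the end), so the port iterates the set's stored element list.
--  * `workers[i]` is always in range (i counts the very rows workers was read from), so the
--    total pyGetD with default "" is exact; `value[task]` is guarded by `task in value.keys()`,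
--    so the total getD with default 0 is exact.
--  * `dict(sorted(newDic.items()))` sorts pairs with distinct first components, so Python never
--    compares the second components; sorting by the key alone is exact.
def sprintLog (sprnt : List (String × List (String × Int))) : List (String × List (String × Int)) :=
  let workers := sprnt.map (fun p => p.1)
  let tasks := sprnt.map (fun p => p.2)
  let lst : PySem.Set String :=
    tasks.foldl (fun L task =>
      (task.map (fun p => p.1)).foldl
        (fun L title => if PySem.Set.contains L title then L else PySem.Set.add L title) L)
      PySem.Set.empty
  let lst2 : PySem.Set String := PySem.Set.ofList (PySem.List.sorted lst (fun x => x))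
  let newDic : PySem.Dict String (List (String × Int)) :=
    lst2.foldl (fun nd task =>
      let temp : PySem.Dict String Int :=
        ((sprnt.map (fun p => p.2)).foldl
          (fun (st : PySem.Dict String Int × Int) value =>
            (if (value.map (fun p => p.1)).contains task then
               st.1.insert (PySem.List.pyGetD workers st.2 "") ((PySem.Dict.mk value).getD task 0)
             else st.1, st.2 + 1))
          (PySem.Dict.empty, 0)).1
      nd.insert task temp.items)
      PySem.Dict.empty
  PySem.List.sorted newDic.items (fun p => p.1)

-- ===== PORT B =====
-- Literal port of Source B: `inverted.setdefault(title, {})[worker] = val` is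
-- `inverted[title] = inverted.get(title, {}) with worker ↦ val`, i.e. Dict.modify.
def sprintLog_alt (sprnt : List (String × List (String × Int))) : List (String × List (String × Int)) :=
  let inverted : PySem.Dict String (PySem.Dict String Int) :=
    sprnt.foldl (fun inv wt =>
      wt.2.foldl (fun inv tv =>
        inv.modify tv.1 PySem.Dict.empty (fun m => m.insert wt.1 tv.2)) inv)
      PySem.Dict.empty
  (PySem.List.sorted inverted.keys (fun t => t)).map
    (fun t => (t, (inverted.getD t PySem.Dict.empty).items))

-- ===== PRECONDITION & SPEC =====
-- Pre_ excludes only association lists in which some worker's inner task list repeats a key: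
-- such a list does not represent any Python dict (dict keys are unique), and the two ports
-- resolve the repeat differently (first-match lookup vs last overwrite).
def Pre_sprintLog (sprnt : List (String × List (String × Int))) : Prop :=
  ∀ r ∈ sprnt, (r.2.map (fun p => p.1)).Nodup
instance (sprnt : List (String × List (String × Int))) : Decidable (Pre_sprintLog sprnt) := by
  unfold Pre_sprintLog; infer_instance

def pvWitness_sprintLog : (List (String × List (String × Int))) :=
  [("w1", [("a", 1), ("b", 2)]), ("w2", [("a", 3)])]

def Spec_sprintLog (sprnt : List (String × List (String × Int))) (out : List (String × List (String × Int))) : Prop := out = sprintLog_alt sprnt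
instance (sprnt : List (String × List (String × Int))) (out : List (String × List (String × Int))) : Decidable (Spec_sprintLog sprnt out) := by unfold Spec_sprintLog; infer_instance

-- ===== CLAIM (what is proved, stated in full; the proofs are below) =====
def Claim_equal_sprintLog : Prop := ∀ (sprnt : List (String × List (String × Int))), Dom_sprintLog sprnt → Pre_sprintLog sprnt → Spec_sprintLog sprnt (sprintLog sprnt)

-- ===== LEMMAS AND PROOFS =====

-- the per-row effect both programs have on the group of task `t`
def pvRowStep (t : String) (acc : PySem.Dict String Int) (r : String × List (String × Int)) :
    PySem.Dict String Int :=
  if (r.2.map (fun p => p.1)).contains t then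
    acc.insert r.1 ((PySem.Dict.mk r.2).getD t 0)
  else acc

-- A's indexed inner loop over the values, with the workers list alongside, is the row fold
theorem pvTempA_eq (t : String) (rows : List (String × List (String × Int)))
    (pre : List String) (acc : PySem.Dict String Int) :
    ((rows.map (fun p => p.2)).foldl
      (fun (st : PySem.Dict String Int × Int) value =>
        (if (value.map (fun p => p.1)).contains t then
           st.1.insert (PySem.List.pyGetD (pre ++ rows.map (fun p => p.1)) st.2 "")
             ((PySem.Dict.mk value).getD t 0)
         else st.1, st.2 + 1))
      (acc, (pre.length : Int))).1
    = rows.foldl (pvRowStep t) acc := by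
  induction rows generalizing pre acc with
  | nil => rfl
  | cons r rows ih =>
    simp only [List.map_cons, List.foldl_cons]
    have hget : PySem.List.pyGetD (pre ++ r.1 :: rows.map (fun p => p.1)) (pre.length : Int) "" = r.1 := by
      simp [PySem.List.pyGetD_natCast, List.getD]
    have hlen : (pre.length : Int) + 1 = ((pre ++ [r.1]).length : Int) := by
      simp
    rw [hget, hlen]
    have := ih (pre := pre ++ [r.1]) (acc := pvRowStep t acc r)
    simpa [pvRowStep, List.append_assoc] using this

-- B's inner loop over one worker's task list, observed at task `t` (inner keys distinct)
theorem pvInnerB_getD (t w : String) (l : List (String × Int))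
    (inv : PySem.Dict String (PySem.Dict String Int))
    (hnd : (l.map (fun p => p.1)).Nodup) :
    (l.foldl (fun d tv => d.modify tv.1 PySem.Dict.empty (fun m => m.insert w tv.2)) inv).getD t PySem.Dict.empty
    = if (l.map (fun p => p.1)).contains t then
        (inv.getD t PySem.Dict.empty).insert w ((PySem.Dict.mk l).getD t 0)
      else inv.getD t PySem.Dict.empty := by
  induction l generalizing inv with
  | nil => simp
  | cons kv l ih =>
    obtain ⟨k, v⟩ := kv
    simp only [List.map_cons, List.nodup_cons] at hnd
    simp only [List.foldl_cons]
    rw [ih _ hnd.2]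
    by_cases hkt : k = t
    · subst hkt
      have hnl : (l.map (fun p => p.1)).contains k = false := by
        simpa using hnd.1
      have hv : (PySem.Dict.mk ((k, v) :: l)).getD k 0 = v := by
        rw [PySem.Dict.getD_eq_get?_getD, PySem.Dict.get?_mk_cons]
        simp
      rw [hnl, PySem.Dict.getD_modify_self, hv]
      simp
    · have hne : t ≠ k := fun h => hkt h.symm
      have hv : (PySem.Dict.mk ((k, v) :: l)).getD t 0 = (PySem.Dict.mk l).getD t 0 := by
        rw [PySem.Dict.getD_eq_get?_getD, PySem.Dict.get?_mk_cons]
        simp [hkt, PySem.Dict.getD_eq_get?_getD]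
      rw [PySem.Dict.getD_modify_of_ne _ _ _ hne, hv, List.map_cons,
        show ((k :: l.map (fun p => p.1)).contains t) = ((l.map (fun p => p.1)).contains t) from by
          simp [hne]]

-- B's whole grouping pass, observed at task `t`, is the same row fold
theorem pvInvertedB_getD (t : String) (rows : List (String × List (String × Int)))
    (inv : PySem.Dict String (PySem.Dict String Int))
    (hnd : ∀ r ∈ rows, (r.2.map (fun p => p.1)).Nodup) :
    (rows.foldl (fun inv wt =>
        wt.2.foldl (fun inv tv =>
          inv.modify tv.1 PySem.Dict.empty (fun m => m.insert wt.1 tv.2)) inv) inv).getD t PySem.Dict.empty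
    = rows.foldl (pvRowStep t) (inv.getD t PySem.Dict.empty) := by
  induction rows generalizing inv with
  | nil => rfl
  | cons r rows ih =>
    simp only [List.foldl_cons]
    rw [ih _ (fun x hx => hnd x (List.mem_cons_of_mem _ hx))]
    rw [pvInnerB_getD t r.1 r.2 inv (hnd r (List.mem_cons_self))]
    rfl

-- the keys collected by B's grouping pass
theorem pvInvertedB_keys (rows : List (String × List (String × Int)))
    (inv : PySem.Dict String (PySem.Dict String Int)) :
    (rows.foldl (fun inv wt =>
        wt.2.foldl (fun inv tv =>
          inv.modify tv.1 PySem.Dict.empty (fun m => m.insert wt.1 tv.2)) inv) inv).keys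
    = (rows.map (fun r => r.2.map (fun p => p.1))).flatten.foldl PySem.Set.add inv.keys := by
  induction rows generalizing inv with
  | nil => rfl
  | cons r rows ih =>
    simp only [List.foldl_cons, List.map_cons, List.flatten_cons, List.foldl_append]
    rw [ih]
    congr 1
    have := PySem.Dict.keys_foldl_modify_key (ν := PySem.Dict String Int) r.2
      (fun tv => tv.1) PySem.Dict.empty (fun _ tv m => m.insert r.1 tv.2) inv
    rw [this, PySem.Set.update]

-- A's guarded set-insertion is Set.add
theorem pvStep_add (L : PySem.Set String) (t : String) :
    (if PySem.Set.contains L t then L else PySem.Set.add L t) = PySem.Set.add L t := by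
  by_cases h : PySem.Set.contains L t = true
  · rw [if_pos h]
    have hadd : PySem.Set.add L t = L := by
      simp [PySem.Set.add, PySem.Set.contains] at h ⊢
      simp [h]
    rw [hadd]
  · rw [if_neg h]

theorem sprintLog_spec : Claim_equal_sprintLog := by
  intro sprnt _hdom hpre
  unfold Spec_sprintLog sprintLog sprintLog_alt
  simp only []
  -- name the flattened title list
  set allT : List String :=
    (sprnt.map (fun r => r.2.map (fun p => p.1))).flatten with hallT
  -- A's title set is Set.ofList allT
  have hA_set :
      (sprnt.map (fun p => p.2)).foldl (fun L task =>
        (task.map (fun p => p.1)).foldl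
          (fun L title => if PySem.Set.contains L title then L else PySem.Set.add L title) L)
        PySem.Set.empty
      = PySem.Set.ofList allT := by
    have h1 : ∀ (task : List (String × Int)) (L : PySem.Set String),
        (task.map (fun p => p.1)).foldl
          (fun L title => if PySem.Set.contains L title then L else PySem.Set.add L title) L
        = (task.map (fun p => p.1)).foldl PySem.Set.add L := by
      intro task L
      exact PySem.List.foldl_congr_mem _ _ _ _ (fun acc x _ => pvStep_add acc x)
    calc (sprnt.map (fun p => p.2)).foldl (fun L task =>
            (task.map (fun p => p.1)).foldl
              (fun L title => if PySem.Set.contains L title then L else PySem.Set.add L title) L)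
            PySem.Set.empty
        = (sprnt.map (fun p => p.2)).foldl (fun L task =>
            (task.map (fun p => p.1)).foldl PySem.Set.add L) PySem.Set.empty := by
          exact PySem.List.foldl_congr_mem _ _ _ _ (fun acc x _ => h1 x acc)
      _ = PySem.Set.ofList allT := by
          rw [PySem.Set.ofList_eq_foldl, hallT, List.foldl_flatten]
          simp only [List.foldl_map]
          rfl
  -- B's key list is the same set
  have hB_keys :
      (sprnt.foldl (fun inv wt =>
          wt.2.foldl (fun inv tv =>
            inv.modify tv.1 PySem.Dict.empty (fun m => m.insert wt.1 tv.2)) inv)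
          PySem.Dict.empty).keys = PySem.Set.ofList allT := by
    rw [pvInvertedB_keys, PySem.Dict.keys_empty, PySem.Set.ofList_eq_foldl, hallT]
  rw [hA_set, hB_keys]
  -- both iterate the same strictly sorted title list
  set tlist := PySem.List.sorted (PySem.Set.ofList allT) (fun x => x) with htlist
  have hnodup_sorted : tlist.Nodup :=
    ((PySem.List.sorted_perm _ _ _).symm).nodup (PySem.Set.nodup_ofList allT)
  have hofl : PySem.Set.ofList tlist = tlist :=
    PySem.Set.ofList_eq_self_of_nodup tlist hnodup_sorted
  rw [hofl]
  -- A builds newDic over the fresh distinct keys of tlist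
  have hitems := PySem.Dict.items_foldl_insert_fresh (ν := List (String × Int)) tlist
    (fun t => t)
    (fun task => (((sprnt.map (fun p => p.2)).foldl
      (fun (st : PySem.Dict String Int × Int) value =>
        (if (value.map (fun p => p.1)).contains task then
           st.1.insert (PySem.List.pyGetD (sprnt.map (fun p => p.1)) st.2 "")
             ((PySem.Dict.mk value).getD task 0)
         else st.1, st.2 + 1))
      (PySem.Dict.empty, 0)).1).items)
    PySem.Dict.empty
    (fun a _ => by simp)
    (by simpa using hnodup_sorted)
  rw [hitems]
  -- the resulting pair list is already sorted by its (strictly increasing) keys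
  have hpw : (tlist.map (fun t => (t, (((sprnt.map (fun p => p.2)).foldl
      (fun (st : PySem.Dict String Int × Int) value =>
        (if (value.map (fun p => p.1)).contains t then
           st.1.insert (PySem.List.pyGetD (sprnt.map (fun p => p.1)) st.2 "")
             ((PySem.Dict.mk value).getD t 0)
         else st.1, st.2 + 1))
      (PySem.Dict.empty, 0)).1).items))).Pairwise (fun a b => a.1 ≤ b.1) := by
    rw [List.pairwise_map]
    exact (PySem.List.sorted_ofList_pairwise_lt allT).imp (fun h => le_of_lt h)
  rw [show (PySem.Dict.empty : PySem.Dict String (List (String × Int))).items = [] from rfl,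
    List.nil_append, PySem.List.sorted_eq_self_of_pairwise _ _ hpw]
  -- pointwise: A's temp at t equals B's group at t
  refine List.map_congr_left (fun t _ => ?_)
  have hAt := pvTempA_eq t sprnt [] PySem.Dict.empty
  simp only [List.nil_append, List.length_nil, Nat.cast_zero] at hAt
  have hBt := pvInvertedB_getD t sprnt PySem.Dict.empty hpre
  rw [show (PySem.Dict.empty : PySem.Dict String (PySem.Dict String Int)).getD t PySem.Dict.empty
      = PySem.Dict.empty from rfl] at hBt
  rw [hAt, hBt]
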